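-- pv_equiv track=rewrite | github.com/pAplakidis/cryptography_tool | src/cihpers.py | substitute_bytes
-- ===== SOURCE A (Python) =====
-- SBOX_TABLE = [
--               ["63", "7c", "77", "7b", "f2", "6b", "6f", "c5", "30", "01", "67", "2b", "fe", "d7", "ab", "76"],
--               ["ca", "82", "c9", "7d", "fa", "59", "47", "f0", "ad", "d4", "a2", "af", "9c", "a4", "72", "c0"],
--               ["b7", "fd", "93", "26", "36", "3f", "f7", "cc", "34", "a5", "e5", "f1", "71", "d8", "31", "15"],
--               ["04", "c7", "23", "c3", "18", "96", "05", "9a", "07", "12", "80", "e2", "eb", "27", "b2", "75"],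
--               ["09", "83", "2c", "1a", "1b", "6e", "5a", "a0", "52", "3b", "d6", "b3", "29", "e3", "2f", "84"],
--               ["53", "d1", "00", "ed", "20", "fc", "b1", "5b", "6a", "cb", "be", "39", "4a", "4c", "58", "cf"],
--               ["d0", "ef", "aa", "fb", "43", "4d", "33", "85", "45", "f9", "02", "7f", "50", "3c", "9f", "a8"],
--               ["51", "a3", "40", "8f", "92", "9d", "38", "f5", "bc", "b6", "da", "21", "10", "ff", "f3", "d2"],
--               ["cd", "0c", "13", "ec", "5f", "97", "44", "17", "c4", "a7", "7e", "3d", "64", "5d", "19", "73"],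
--               ["60", "81", "4f", "dc", "22", "2a", "90", "88", "46", "ee", "b8", "14", "de", "5e", "0b", "db"],
--               ["e0", "32", "3a", "0a", "49", "06", "24", "5c", "c2", "d3", "ac", "62", "91", "95", "e4", "79"],
--               ["e7", "c8", "37", "6d", "8d", "d5", "4e", "a9", "6c", "56", "f4", "ea", "65", "7a", "ae", "08"],
--               ["ba", "78", "25", "2e", "1c", "a6", "b4", "c6", "e8", "dd", "74", "1f", "4b", "bd", "8b", "8a"],
--               ["70", "3e", "b5", "66", "48", "03", "f6", "0e", "61", "35", "57", "b9", "86", "c1", "1d", "9e"],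
--               ["e1", "f8", "98", "11", "69", "d9", "8e", "94", "9b", "1e", "87", "e9", "ce", "55", "28", "df"],
--               ["8c", "a1", "89", "0d", "bf", "e6", "42", "68", "41", "99", "2d", "0f", "b0", "54", "bb", "16"]]
--
-- def substitute_bytes(plaintext):
--     new_plaintext = [[None]*4 for i in range(4)]
--
--     for i in range(4):
--         for j in range(4):
--             idx1 = int(plaintext[i][j][0], 16)
--             idx2 = int(plaintext[i][j][1], 16)
--             new_plaintext[i][j] = SBOX_TABLE[idx1][idx2]
--
--     return new_plaintext
-- ===== SOURCE B (Python) =====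
-- def _gf_mul(a, b):
--     # multiply in GF(2^8) modulo the AES polynomial 0x11b
--     r = 0
--     for _ in range(8):
--         if b & 1:
--             r ^= a
--         b >>= 1
--         a <<= 1
--         if a & 0x100:
--             a ^= 0x11b
--     return r & 0xFF
--
-- def _sbox(byte):
--     # multiplicative inverse byte^254 (0 -> 0) by an addition chain, then the AES affine map
--     inv = byte
--     for _ in range(6):
--         inv = _gf_mul(_gf_mul(inv, inv), byte)
--     inv = _gf_mul(inv, inv)
--     v = inv
--     for sh in (1, 2, 3, 4):
--         v ^= ((inv << sh) | (inv >> (8 - sh))) & 0xFF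
--     return v ^ 0x63
--
-- def substitute_bytes(plaintext):
--     return [["%02x" % _sbox(int(plaintext[i][j][0], 16) * 16 + int(plaintext[i][j][1], 16))
--              for j in range(4)] for i in range(4)]
-- ===== Notes on version B (the rewrite author's own statement) =====
-- stated objective: alternative
-- what changed: B replaces A's preallocated grid filled by nested index loops with 16x16 S-box table lookups by a nested comprehension that computes each S-box value in closed form: the GF(2^8) multiplicative inverse (byte^254 modulo 0x11b, 0 maps to 0) followed by the AES affine transform, formatted as lowercase 2-char hex.
import Mathlib
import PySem

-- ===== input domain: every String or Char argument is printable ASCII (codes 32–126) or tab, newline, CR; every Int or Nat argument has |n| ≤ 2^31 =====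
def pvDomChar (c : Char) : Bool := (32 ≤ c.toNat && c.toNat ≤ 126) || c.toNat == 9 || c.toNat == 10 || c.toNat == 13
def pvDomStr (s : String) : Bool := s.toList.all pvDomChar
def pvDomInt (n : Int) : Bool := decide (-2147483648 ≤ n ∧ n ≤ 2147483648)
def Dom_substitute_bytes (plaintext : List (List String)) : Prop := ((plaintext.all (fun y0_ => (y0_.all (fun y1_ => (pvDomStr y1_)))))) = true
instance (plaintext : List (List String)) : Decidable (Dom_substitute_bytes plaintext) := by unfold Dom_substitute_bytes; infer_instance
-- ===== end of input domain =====

-- B replaces A's 16x16 S-box table lookup by closed-form GF(2^8) arithmetic (inverse + affine map); alternative decomposition, not faster.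

-- ===== PORT A =====
def SBOX_TABLE : List (List String) := [
  ["63", "7c", "77", "7b", "f2", "6b", "6f", "c5", "30", "01", "67", "2b", "fe", "d7", "ab", "76"],
  ["ca", "82", "c9", "7d", "fa", "59", "47", "f0", "ad", "d4", "a2", "af", "9c", "a4", "72", "c0"],
  ["b7", "fd", "93", "26", "36", "3f", "f7", "cc", "34", "a5", "e5", "f1", "71", "d8", "31", "15"],
  ["04", "c7", "23", "c3", "18", "96", "05", "9a", "07", "12", "80", "e2", "eb", "27", "b2", "75"],
  ["09", "83", "2c", "1a", "1b", "6e", "5a", "a0", "52", "3b", "d6", "b3", "29", "e3", "2f", "84"],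
  ["53", "d1", "00", "ed", "20", "fc", "b1", "5b", "6a", "cb", "be", "39", "4a", "4c", "58", "cf"],
  ["d0", "ef", "aa", "fb", "43", "4d", "33", "85", "45", "f9", "02", "7f", "50", "3c", "9f", "a8"],
  ["51", "a3", "40", "8f", "92", "9d", "38", "f5", "bc", "b6", "da", "21", "10", "ff", "f3", "d2"],
  ["cd", "0c", "13", "ec", "5f", "97", "44", "17", "c4", "a7", "7e", "3d", "64", "5d", "19", "73"],
  ["60", "81", "4f", "dc", "22", "2a", "90", "88", "46", "ee", "b8", "14", "de", "5e", "0b", "db"],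
  ["e0", "32", "3a", "0a", "49", "06", "24", "5c", "c2", "d3", "ac", "62", "91", "95", "e4", "79"],
  ["e7", "c8", "37", "6d", "8d", "d5", "4e", "a9", "6c", "56", "f4", "ea", "65", "7a", "ae", "08"],
  ["ba", "78", "25", "2e", "1c", "a6", "b4", "c6", "e8", "dd", "74", "1f", "4b", "bd", "8b", "8a"],
  ["70", "3e", "b5", "66", "48", "03", "f6", "0e", "61", "35", "57", "b9", "86", "c1", "1d", "9e"],
  ["e1", "f8", "98", "11", "69", "d9", "8e", "94", "9b", "1e", "87", "e9", "ce", "55", "28", "df"],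
  ["8c", "a1", "89", "0d", "bf", "e6", "42", "68", "41", "99", "2d", "0f", "b0", "54", "bb", "16"]]

-- shared transliteration of `plaintext[i][j]` and `int(str1char, 16)`; `.getD` defaults are
-- unreachable inside Pre_ (they stand for the exceptions Pre_ excludes)
def pvCell (plaintext : List (List String)) (i j : Int) : String :=
  (PySem.List.pyGet? ((PySem.List.pyGet? plaintext i).getD []) j).getD ""

def pvHex1 (cell : String) (k : Int) : Int :=
  (PySem.Int.ofCharsBase? [(PySem.Str.pyGet? cell k).getD ' '] 16).getD 0

-- the body of A's inner loop: idx1 = int(cell[0],16); idx2 = int(cell[1],16); SBOX_TABLE[idx1][idx2]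
def lookA (cell : String) : String :=
  let idx1 := pvHex1 cell 0
  let idx2 := pvHex1 cell 1
  (PySem.List.pyGet? ((PySem.List.pyGet? SBOX_TABLE idx1).getD []) idx2).getD ""

-- A: preallocated 4x4 grid ([[None]*4...] ported with "" as the typed placeholder), filled by
-- nested index loops that assign via set
def substitute_bytes (plaintext : List (List String)) : List (List String) :=
  let init : List (List String) := List.replicate 4 (List.replicate 4 "")
  (PySem.List.pyRange 0 4 1).foldl (fun np i =>
    (PySem.List.pyRange 0 4 1).foldl (fun np j =>
      np.set i.toNat (((PySem.List.pyGet? np i).getD []).set j.toNat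
        (lookA (pvCell plaintext i j)))) np) init

-- ===== PORT B =====
-- GF(2^8) product modulo 0x11b, the 8-step shift-and-xor loop of Source B
def gfMul (a b : Nat) : Nat :=
  let s := (List.range 8).foldl (fun (s : Nat × Nat × Nat) _ =>
    let r := if s.2.2 &&& 1 ≠ 0 then s.1 ^^^ s.2.1 else s.1
    let b := s.2.2 >>> 1
    let a := s.2.1 <<< 1
    let a := if a &&& 0x100 ≠ 0 then a ^^^ 0x11b else a
    (r, a, b)) (0, a, b)
  s.1 &&& 0xFF

-- inverse byte^254 by the addition chain of Source B (0 -> 0), then the affine map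
def sboxMath (byte : Nat) : Nat :=
  let inv := (List.range 6).foldl (fun inv _ => gfMul (gfMul inv inv) byte) byte
  let inv := gfMul inv inv
  let v := [1, 2, 3, 4].foldl (fun v sh => v ^^^ (((inv <<< sh) ||| (inv >>> (8 - sh))) &&& 0xFF)) inv
  v ^^^ 0x63

def hexChar (n : Nat) : Char := ("0123456789abcdef".toList.getD n '0')

-- "%02x" for a value < 256
def toHex2 (v : Nat) : String := String.ofList [hexChar (v / 16), hexChar (v % 16)]

-- the body of B's comprehension: parse the two hex digits, S-box by field arithmetic, format
def lookB (cell : String) : String := toHex2 (sboxMath (pvHex1 cell 0 * 16 + pvHex1 cell 1).toNat)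

def substitute_bytes_alt (plaintext : List (List String)) : List (List String) :=
  (PySem.List.pyRange 0 4 1).map (fun i =>
    (PySem.List.pyRange 0 4 1).map (fun j => lookB (pvCell plaintext i j)))

-- ===== PRECONDITION & SPEC =====
def isHexDigit (c : Char) : Bool := "0123456789abcdefABCDEF".toList.contains c

def cellOK (cell : String) : Bool :=
  match cell.toList with
  | c0 :: c1 :: _ => isHexDigit c0 && isHexDigit c1
  | _ => false

-- Pre_ excludes exactly the inputs where A raises: fewer than 4 rows / 4 cells (IndexError),
-- or a cell whose first two characters are not both hex digits (IndexError/ValueError on int(...,16))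
def Pre_substitute_bytes (plaintext : List (List String)) : Prop :=
  4 ≤ plaintext.length ∧
    ∀ row ∈ plaintext.take 4, 4 ≤ row.length ∧ ∀ cell ∈ row.take 4, cellOK cell = true
instance (plaintext : List (List String)) : Decidable (Pre_substitute_bytes plaintext) := by
  unfold Pre_substitute_bytes; infer_instance

def pvWitness_substitute_bytes : List (List String) :=
  [["00", "1a", "ff", "3C"], ["53", "7e", "Aa", "09"],
   ["c5", "d4", "e1", "0b"], ["10", "2f", "8D", "b6"]]

def Spec_substitute_bytes (plaintext : List (List String)) (out : List (List String)) : Prop := out = substitute_bytes_alt plaintext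
instance (plaintext : List (List String)) (out : List (List String)) : Decidable (Spec_substitute_bytes plaintext out) := by unfold Spec_substitute_bytes; infer_instance

-- ===== CLAIM (what is proved, stated in full; the proofs are below) =====
def Claim_equal_substitute_bytes : Prop := ∀ (plaintext : List (List String)), Dom_substitute_bytes plaintext → Pre_substitute_bytes plaintext → Spec_substitute_bytes plaintext (substitute_bytes plaintext)


-- ===== LEMMAS AND PROOFS =====

-- the hex digits int(c, 16) accepts for a 1-character string, and their values
def hexDigits : List Char :=
  ['0','1','2','3','4','5','6','7','8','9','a','b','c','d','e','f','A','B','C','D','E','F']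

def hexVal (c : Char) : Int :=
  if c.toNat ≤ 57 then c.toNat - 48 else if c.toNat ≤ 70 then c.toNat - 55 else c.toNat - 87

theorem isHexDigit_mem {c : Char} (h : isHexDigit c = true) : c ∈ hexDigits := by
  simpa [isHexDigit, hexDigits] using h

set_option maxRecDepth 4000 in
theorem hv_eval : ∀ c ∈ hexDigits, (PySem.Int.ofCharsBase? [c] 16).getD 0 = hexVal c := by
  intro c hc
  fin_cases hc <;> rfl

theorem hexVal_bounds : ∀ c ∈ hexDigits, 0 ≤ hexVal c ∧ hexVal c < 16 := by
  intro c hc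
  fin_cases hc <;> decide

-- the heart of the equivalence: for every byte, the table entry equals the
-- field-arithmetic S-box value (256 cases, checked by the kernel)
set_option maxRecDepth 40000 in
theorem byte_eq : ∀ hi ∈ List.range 16, ∀ lo ∈ List.range 16,
    (PySem.List.pyGet? ((PySem.List.pyGet? SBOX_TABLE (hi : Int)).getD []) (lo : Int)).getD ""
      = toHex2 (sboxMath (hi * 16 + lo)) := by decide

theorem pvHex1_eval (cell : String) (c0 c1 : Char) (r : List Char) (h : cell.toList = c0 :: c1 :: r) :
    pvHex1 cell 0 = (PySem.Int.ofCharsBase? [c0] 16).getD 0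
      ∧ pvHex1 cell 1 = (PySem.Int.ofCharsBase? [c1] 16).getD 0 := by
  have h0 : (0:Int) ≤ (r.length:Int) + 1 := by omega
  constructor <;>
  · simp [pvHex1, PySem.Str.pyGet?, h, PySem.Chars.pyGet?_eq_listPyGet?, PySem.List.pyGet?,
      PySem.List.pyIdx?, h0]

theorem cell_agree (cell : String) (h : cellOK cell = true) : lookA cell = lookB cell := by
  unfold cellOK at h
  rcases hl : cell.toList with _ | ⟨c0, _ | ⟨c1, r⟩⟩ <;> rw [hl] at h <;> simp at h
  obtain ⟨hc0, hc1⟩ := h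
  have m0 := isHexDigit_mem hc0
  have m1 := isHexDigit_mem hc1
  obtain ⟨e0, e1⟩ := pvHex1_eval cell c0 c1 r hl
  obtain ⟨nn0, lt0⟩ := hexVal_bounds c0 m0
  obtain ⟨nn1, lt1⟩ := hexVal_bounds c1 m1
  unfold lookA lookB
  rw [e0, e1, hv_eval c0 m0, hv_eval c1 m1]
  have cast0 : hexVal c0 = ((hexVal c0).toNat : Int) := by omega
  have cast1 : hexVal c1 = ((hexVal c1).toNat : Int) := by omega
  have hbyte : (hexVal c0 * 16 + hexVal c1).toNat = (hexVal c0).toNat * 16 + (hexVal c1).toNat := by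
    omega
  rw [hbyte, cast0, cast1]
  exact byte_eq (hexVal c0).toNat (List.mem_range.mpr (by omega)) (hexVal c1).toNat
    (List.mem_range.mpr (by omega))

theorem pyRange4 : PySem.List.pyRange 0 4 1 = [0, 1, 2, 3] := by decide

-- indexing a cons-list of length ≥ 4 with the literal indices 0..3
theorem g0 {α : Type} (x0 x1 x2 x3 : α) (r : List α) :
    PySem.List.pyGet? (x0::x1::x2::x3::r) 0 = some x0 := by
  have hA : (0:Int) ≤ (r.length:Int) + 1 + 1 + 1 := by omega
  have hB : (0:Int) ≤ (r.length:Int) + 1 + 1 + 1 := by omega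
  have hC : (0:Int) ≤ (r.length:Int) + 1 + 1 := by omega
  have hD : (0:Int) ≤ (r.length:Int) + 1 := by omega
  have hE : (0:Int) ≤ (r.length:Int) := by omega
  simp [PySem.List.pyGet?, PySem.List.pyIdx?, hA, hB, hC, hD, hE]

theorem g1 {α : Type} (x0 x1 x2 x3 : α) (r : List α) :
    PySem.List.pyGet? (x0::x1::x2::x3::r) 1 = some x1 := by
  have hA : (1:Int) ≤ (r.length:Int) + 1 + 1 + 1 := by omega
  have hB : (0:Int) ≤ (r.length:Int) + 1 + 1 + 1 := by omega
  have hC : (0:Int) ≤ (r.length:Int) + 1 + 1 := by omega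
  have hD : (0:Int) ≤ (r.length:Int) + 1 := by omega
  have hE : (0:Int) ≤ (r.length:Int) := by omega
  simp [PySem.List.pyGet?, PySem.List.pyIdx?, hA, hB, hC, hD, hE]

theorem g2 {α : Type} (x0 x1 x2 x3 : α) (r : List α) :
    PySem.List.pyGet? (x0::x1::x2::x3::r) 2 = some x2 := by
  have hA : (2:Int) ≤ (r.length:Int) + 1 + 1 + 1 := by omega
  have hB : (0:Int) ≤ (r.length:Int) + 1 + 1 + 1 := by omega
  have hC : (0:Int) ≤ (r.length:Int) + 1 + 1 := by omega
  have hD : (0:Int) ≤ (r.length:Int) + 1 := by omega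
  have hE : (0:Int) ≤ (r.length:Int) := by omega
  simp [PySem.List.pyGet?, PySem.List.pyIdx?, hA, hB, hC, hD, hE]

theorem g3 {α : Type} (x0 x1 x2 x3 : α) (r : List α) :
    PySem.List.pyGet? (x0::x1::x2::x3::r) 3 = some x3 := by
  have hA : (3:Int) ≤ (r.length:Int) + 1 + 1 + 1 := by omega
  have hB : (0:Int) ≤ (r.length:Int) + 1 + 1 + 1 := by omega
  have hC : (0:Int) ≤ (r.length:Int) + 1 + 1 := by omega
  have hD : (0:Int) ≤ (r.length:Int) + 1 := by omega
  have hE : (0:Int) ≤ (r.length:Int) := by omega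
  simp [PySem.List.pyGet?, PySem.List.pyIdx?, hA, hB, hC, hD, hE]

-- both ports evaluated on a 4x4-destructured input: the loop/grid machinery computes away
theorem evalA (a0 a1 a2 a3 b0 b1 b2 b3 c0 c1 c2 c3 d0 d1 d2 d3 : String)
    (ra rb rc rd : List String) (rest : List (List String)) :
    substitute_bytes ((a0::a1::a2::a3::ra)::(b0::b1::b2::b3::rb)::(c0::c1::c2::c3::rc)::(d0::d1::d2::d3::rd)::rest)
      = [[lookA a0, lookA a1, lookA a2, lookA a3], [lookA b0, lookA b1, lookA b2, lookA b3],
         [lookA c0, lookA c1, lookA c2, lookA c3], [lookA d0, lookA d1, lookA d2, lookA d3]] := by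
  simp [substitute_bytes, pyRange4, List.foldl, List.set, pvCell, g0, g1, g2, g3]

theorem evalB (a0 a1 a2 a3 b0 b1 b2 b3 c0 c1 c2 c3 d0 d1 d2 d3 : String)
    (ra rb rc rd : List String) (rest : List (List String)) :
    substitute_bytes_alt ((a0::a1::a2::a3::ra)::(b0::b1::b2::b3::rb)::(c0::c1::c2::c3::rc)::(d0::d1::d2::d3::rd)::rest)
      = [[lookB a0, lookB a1, lookB a2, lookB a3], [lookB b0, lookB b1, lookB b2, lookB b3],
         [lookB c0, lookB c1, lookB c2, lookB c3], [lookB d0, lookB d1, lookB d2, lookB d3]] := by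
  simp [substitute_bytes_alt, pyRange4, List.map, pvCell, g0, g1, g2, g3]

-- ===== VERDICT (by name: the statement is the Claim_ definition above) =====
theorem substitute_bytes_spec : Claim_equal_substitute_bytes := by
  intro pt _ hpre
  obtain ⟨hlen, hrows⟩ := hpre
  rcases pt with _ | ⟨r0, _ | ⟨r1, _ | ⟨r2, _ | ⟨r3, rest⟩⟩⟩⟩ <;> simp at hlen
  have h0 := hrows r0 (by simp)
  have h1 := hrows r1 (by simp)
  have h2 := hrows r2 (by simp)
  have h3 := hrows r3 (by simp)
  clear hrows hlen
  obtain ⟨hl0, hc0⟩ := h0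
  obtain ⟨hl1, hc1⟩ := h1
  obtain ⟨hl2, hc2⟩ := h2
  obtain ⟨hl3, hc3⟩ := h3
  rcases r0 with _ | ⟨a0, _ | ⟨a1, _ | ⟨a2, _ | ⟨a3, ra⟩⟩⟩⟩ <;> simp at hl0
  rcases r1 with _ | ⟨b0, _ | ⟨b1, _ | ⟨b2, _ | ⟨b3, rb⟩⟩⟩⟩ <;> simp at hl1
  rcases r2 with _ | ⟨c0, _ | ⟨c1, _ | ⟨c2, _ | ⟨c3, rc⟩⟩⟩⟩ <;> simp at hl2
  rcases r3 with _ | ⟨d0, _ | ⟨d1, _ | ⟨d2, _ | ⟨d3, rd⟩⟩⟩⟩ <;> simp at hl3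
  simp only [List.take, List.mem_cons, List.not_mem_nil, or_false, forall_eq_or_imp,
    forall_eq] at hc0 hc1 hc2 hc3
  obtain ⟨k00, k01, k02, k03⟩ := hc0
  obtain ⟨k10, k11, k12, k13⟩ := hc1
  obtain ⟨k20, k21, k22, k23⟩ := hc2
  obtain ⟨k30, k31, k32, k33⟩ := hc3
  unfold Spec_substitute_bytes
  rw [evalA, evalB, cell_agree _ k00, cell_agree _ k01, cell_agree _ k02, cell_agree _ k03,
    cell_agree _ k10, cell_agree _ k11, cell_agree _ k12, cell_agree _ k13,
    cell_agree _ k20, cell_agree _ k21, cell_agree _ k22, cell_agree _ k23,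
    cell_agree _ k30, cell_agree _ k31, cell_agree _ k32, cell_agree _ k33]
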